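-- pv_equiv track=rewrite | github.com/YasinFM/threes-with-pygame | Pygame.py | namomkenc
-- ===== SOURCE A (Python) =====
-- def namomkenr(x):
--     for i in range(len(x)-1):
--         if x[i] != '1' and x[i] != '2':
--             if x[i] == x[i+1]:
--                 return False
--         elif x[i] == '1' :
--             if x[i+1] == '2':
--                 return False
--         elif x[i] == '2' :
--             if x[i+1] == '1':
--                 return False
--     return True
--
-- def namomkenc(x):
--     b = []
--     for i in range(len(x)):
--         c = []
--         for j in range(len(x)):
--             c += [x[j][i]]
--         b += [c]
--     x = b
--     if namomkenr(x):
--         return True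
--     return False
-- ===== SOURCE B (Python) =====
-- def namomkenc(x):
--     n = len(x)
--     match = [True] * (n - 1)
--     for j in range(n):
--         row = x[j]
--         for i in range(n - 1):
--             if row[i] != row[i + 1]:
--                 match[i] = False
--     return not any(match)
-- ===== Notes on version B (the rewrite author's own statement) =====
-- stated objective: faster
-- what changed: B never builds the transpose: it keeps a per-column-pair boolean flag array and sweeps the grid row-major once, clearing a flag on any cell mismatch, then returns not any(flag); A materialises all column lists and compares whole adjacent columns in a second pass (with dead '1'/'2' string branches that never fire on lists).
import Mathlib
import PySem

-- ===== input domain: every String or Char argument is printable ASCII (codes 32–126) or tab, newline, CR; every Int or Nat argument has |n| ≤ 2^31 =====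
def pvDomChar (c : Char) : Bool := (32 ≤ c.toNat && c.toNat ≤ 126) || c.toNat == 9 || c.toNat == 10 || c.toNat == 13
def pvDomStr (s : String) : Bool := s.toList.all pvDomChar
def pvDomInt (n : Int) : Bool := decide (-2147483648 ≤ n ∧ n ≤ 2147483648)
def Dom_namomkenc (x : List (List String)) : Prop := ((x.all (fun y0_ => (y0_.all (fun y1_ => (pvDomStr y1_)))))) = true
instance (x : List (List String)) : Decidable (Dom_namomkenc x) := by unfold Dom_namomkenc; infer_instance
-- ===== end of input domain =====

-- B avoids building the transpose: one row-major sweep clears per-column-pair flags; same O(n^2) asymptotics but measurably faster constant (no column lists allocated) (objective: faster).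

-- ===== PORT A =====
-- Python's namomkenr here receives COLUMNS (lists); a Python list never equals the
-- strings '1'/'2', so only the first branch ("x[i] == x[i+1] → False") is live;
-- ported as exactly that comparison.  In-range indexing (guaranteed by Pre_) is
-- ported with getD.
def namomkenrA (cols : List (List String)) : Bool :=
  (List.range (cols.length - 1)).all (fun i => !(cols.getD i [] == cols.getD (i + 1) []))

def namomkenc (x : List (List String)) : Bool :=
  let n := x.length
  let b := (List.range n).map (fun i => (List.range n).map (fun j => (x.getD j []).getD i ""))
  if namomkenrA b then true else false

-- ===== PORT B =====
def namomkenc_alt (x : List (List String)) : Bool :=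
  let n := x.length
  let m := (List.range n).foldl (fun m j =>
      (List.range (n - 1)).foldl (fun m i =>
        if ¬ ((x.getD j []).getD i "" = (x.getD j []).getD (i + 1) "") then m.set i false else m) m)
    (List.replicate (n - 1) true)
  !(m.any id)

-- ===== PRECONDITION & SPEC =====
-- Pre_: every row has at least len(x) entries; otherwise the Python A (and B) raise IndexError.
def Pre_namomkenc (x : List (List String)) : Prop := ∀ r ∈ x, x.length ≤ r.length
instance (x : List (List String)) : Decidable (Pre_namomkenc x) := by unfold Pre_namomkenc; infer_instance
def pvWitness_namomkenc : List (List String) := [["a", "b"], ["c", "d"]]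

def Spec_namomkenc (x : List (List String)) (out : Bool) : Prop := out = namomkenc_alt x
instance (x : List (List String)) (out : Bool) : Decidable (Spec_namomkenc x out) := by unfold Spec_namomkenc; infer_instance

-- ===== CLAIM (what is proved, stated in full; the proofs are below) =====
def Claim_equal_namomkenc : Prop := ∀ (x : List (List String)), Dom_namomkenc x → Pre_namomkenc x → Spec_namomkenc x (namomkenc x)

-- ===== LEMMAS AND PROOFS =====

-- entry of the grid as both ports read it
def pvEnt (x : List (List String)) (j i : Nat) : String := (x.getD j []).getD i ""

-- the inner flag-update step of B
def pvStep (x : List (List String)) (j : Nat) (m : List Bool) (i : Nat) : List Bool :=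
  if ¬ (pvEnt x j i = pvEnt x j (i + 1)) then m.set i false else m

-- B's port, phrased with the named helpers (definitional)
lemma pvAlt_def (x : List (List String)) :
    namomkenc_alt x = !(((List.range x.length).foldl
        (fun m j => (List.range (x.length - 1)).foldl (pvStep x j) m)
        (List.replicate (x.length - 1) true)).any id) := rfl

-- A's port, phrased with the named helpers
lemma pvA_def (x : List (List String)) :
    namomkenc x = namomkenrA ((List.range x.length).map
        (fun i => (List.range x.length).map (fun j => pvEnt x j i))) := by
  unfold namomkenc pvEnt
  dsimp only
  split <;> simp_all

lemma pvStep_length (x : List (List String)) (j : Nat) (m : List Bool) (i : Nat) :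
    (pvStep x j m i).length = m.length := by
  unfold pvStep; split <;> simp

lemma pvInner_length (x : List (List String)) (j : Nat) (k : Nat) (m : List Bool) :
    ((List.range k).foldl (pvStep x j) m).length = m.length := by
  induction k generalizing m with
  | zero => simp
  | succ k ih =>
    rw [List.range_succ, List.foldl_append]
    simp only [List.foldl_cons, List.foldl_nil]
    rw [pvStep_length, ih]

lemma pvInner_getD (x : List (List String)) (j : Nat) (k : Nat) (m : List Bool) (i : Nat)
    (hk : k ≤ m.length) :
    ((List.range k).foldl (pvStep x j) m).getD i false =
      if i < k then (m.getD i false && decide (pvEnt x j i = pvEnt x j (i + 1)))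
      else m.getD i false := by
  induction k generalizing m with
  | zero => simp
  | succ k ih =>
    rw [List.range_succ, List.foldl_append]
    simp only [List.foldl_cons, List.foldl_nil]
    have hlen : ((List.range k).foldl (pvStep x j) m).length = m.length := pvInner_length x j k m
    have hik := ih m (le_of_lt (Nat.lt_of_succ_le hk))
    rw [pvStep]
    by_cases heq : pvEnt x j k = pvEnt x j (k + 1)
    · simp only [heq, not_true_eq_false, if_false]
      rw [hik]
      by_cases hi : i < k + 1
      · by_cases hi' : i < k
        · simp [hi, hi']
        · have : i = k := by omega
          subst this
          simp [hi, heq]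
      · simp [hi, show ¬ i < k by omega]
    · simp only [heq, not_false_eq_true, if_true]
      by_cases hi' : i < k
      · rw [List.getD_eq_getElem?_getD, List.getElem?_set_ne (by omega),
          ← List.getD_eq_getElem?_getD, hik]
        simp [hi', show i < k + 1 by omega]
      · by_cases hik' : i = k
        · subst hik'
          rw [List.getD_eq_getElem?_getD, List.getElem?_set_self (by rw [hlen]; omega)]
          simp [show i < i + 1 by omega, heq]
        · rw [List.getD_eq_getElem?_getD, List.getElem?_set_ne (by omega),
            ← List.getD_eq_getElem?_getD, hik]
          simp [hi', show ¬ i < k + 1 by omega]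

lemma pvOuter_length (x : List (List String)) (js : List Nat) (k : Nat) (m : List Bool) :
    (js.foldl (fun m j => (List.range k).foldl (pvStep x j) m) m).length = m.length := by
  induction js generalizing m with
  | nil => rfl
  | cons j js ih => simp only [List.foldl_cons]; rw [ih, pvInner_length]

lemma pvOuter_getD (x : List (List String)) (js : List Nat) (k : Nat) (m : List Bool) (i : Nat)
    (hk : k ≤ m.length) (hi : i < k) :
    (js.foldl (fun m j => (List.range k).foldl (pvStep x j) m) m).getD i false =
      (m.getD i false && js.all (fun j => decide (pvEnt x j i = pvEnt x j (i + 1)))) := by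
  induction js generalizing m with
  | nil => simp
  | cons j js ih =>
    simp only [List.foldl_cons, List.all_cons]
    rw [ih _ (by rw [pvInner_length]; exact hk), pvInner_getD x j k m i hk]
    simp [hi, Bool.and_assoc]

lemma pvColEq (x : List (List String)) (n i : Nat) :
    ((List.range n).map (fun j => pvEnt x j i) = (List.range n).map (fun j => pvEnt x j (i + 1)))
      ↔ ∀ j ∈ List.range n, pvEnt x j i = pvEnt x j (i + 1) := by
  constructor
  · intro h j hj
    have h2 := List.ext_getElem?_iff.mp h j
    have hjn := List.mem_range.mp hj
    simpa [List.getElem?_map, List.getElem?_range, hjn] using h2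
  · intro h
    exact List.map_congr_left h

lemma pvCols_getD (x : List (List String)) (n i : Nat) (hi : i < n) :
    ((List.range n).map (fun i => (List.range n).map (fun j => pvEnt x j i))).getD i [] =
      (List.range n).map (fun j => pvEnt x j i) := by
  rw [List.getD_eq_getElem?_getD, List.getElem?_map, List.getElem?_range hi]
  rfl

theorem namomkenc_spec_aux (x : List (List String)) :
    namomkenc x = namomkenc_alt x := by
  rw [pvA_def, pvAlt_def]
  set n := x.length with hn
  set M := ((List.range n).foldl
      (fun m j => (List.range (n - 1)).foldl (pvStep x j) m)
      (List.replicate (n - 1) true)) with hM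
  have hBlen : M.length = n - 1 := by
    rw [hM, pvOuter_length, List.length_replicate]
  have hBfold : ∀ i, i < n - 1 →
      M.getD i false = (List.range n).all (fun j => decide (pvEnt x j i = pvEnt x j (i + 1))) := by
    intro i hi
    rw [hM, pvOuter_getD x (List.range n) (n - 1) (List.replicate (n - 1) true) i (by simp) hi]
    simp [hi]
  unfold namomkenrA
  simp only [List.length_map, List.length_range]
  rw [Bool.eq_iff_iff, List.all_eq_true]
  constructor
  · intro hA
    simp only [Bool.not_eq_true', List.any_eq_false]
    intro b hb
    rcases List.getElem_of_mem hb with ⟨i, hilen, hib⟩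
    rw [hBlen] at hilen
    by_contra hbtrue
    simp only [id] at hbtrue
    subst hbtrue
    have hMg : M.getD i false = true := by
      rw [List.getD_eq_getElem?_getD,
        List.getElem?_eq_getElem (by rw [hBlen]; exact hilen)]
      simpa using hib
    rw [hBfold i hilen, List.all_eq_true] at hMg
    have hcols := hA i (List.mem_range.mpr hilen)
    simp only [Bool.not_eq_eq_eq_not, Bool.not_true, beq_eq_false_iff_ne, ne_eq] at hcols
    apply hcols
    rw [pvCols_getD x n i (by omega), pvCols_getD x n (i + 1) (by omega)]
    exact (pvColEq x n i).mpr (fun j hj => by simpa using hMg j hj)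
  · intro hB
    simp only [Bool.not_eq_true', List.any_eq_false] at hB
    intro i hi
    rw [List.mem_range] at hi
    simp only [Bool.not_eq_eq_eq_not, Bool.not_true, beq_eq_false_iff_ne, ne_eq]
    intro hcols
    rw [pvCols_getD x n i (by omega), pvCols_getD x n (i + 1) (by omega)] at hcols
    have hall := (pvColEq x n i).mp hcols
    have hMi : M.getD i false = true := by
      rw [hBfold i hi, List.all_eq_true]
      intro j hj
      simpa using hall j hj
    have hmem : (true : Bool) ∈ M := by
      have hlt : i < M.length := by rw [hBlen]; exact hi
      have : M.getD i false = M[i]'hlt := by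
        rw [List.getD_eq_getElem?_getD, List.getElem?_eq_getElem hlt]
        rfl
      rw [this] at hMi
      rw [← hMi]
      exact List.getElem_mem _
    have := hB true hmem
    simp at this

-- ===== VERDICT (by name: the statement is the Claim_ definition above) =====
theorem namomkenc_spec : Claim_equal_namomkenc := by
  intro x _ _
  unfold Spec_namomkenc
  exact namomkenc_spec_aux x
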